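-- pv_equiv track=rewrite | github.com/Ruuudy1/HFT_PYNQ-Z1 | scripts/dynamic_table.py | bytearrayToNumber
-- ===== SOURCE A (Python) =====
-- def bytearrayToNumber(ba):
--     total = 0
--     multiplier = 1
--     for count in range(len(ba) - 1, -1, -1):
--         byte = ba[count]
--         total += multiplier * byte
--         multiplier *= 256
--     return total
-- ===== SOURCE B (Python) =====
-- def bytearrayToNumber(ba):
--     total = 0
--     for byte in ba:
--         total = total * 256 + byte
--     return total
-- ===== Notes on version B (the rewrite author's own statement) =====
-- stated objective: simpler
-- what changed: Replaced the reverse index loop with a separate place-value multiplier by a forward Horner pass (total = total*256 + byte) over the bytes themselves.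
import Mathlib
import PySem

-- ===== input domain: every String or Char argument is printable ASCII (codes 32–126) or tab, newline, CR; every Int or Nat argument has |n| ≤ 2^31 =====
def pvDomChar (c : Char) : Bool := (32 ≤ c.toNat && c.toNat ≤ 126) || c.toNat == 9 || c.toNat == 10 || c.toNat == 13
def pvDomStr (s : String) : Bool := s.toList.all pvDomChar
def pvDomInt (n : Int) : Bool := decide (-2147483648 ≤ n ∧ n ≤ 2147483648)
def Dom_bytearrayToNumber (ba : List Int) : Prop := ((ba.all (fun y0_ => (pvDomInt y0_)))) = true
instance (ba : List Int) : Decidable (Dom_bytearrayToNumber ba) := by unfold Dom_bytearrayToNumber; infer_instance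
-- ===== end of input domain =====

-- B replaces A's reverse index loop with an explicit multiplier by a forward Horner pass; objective: simpler.

-- ===== PORT A =====
-- for count in range(len(ba)-1, -1, -1): byte = ba[count]; total += multiplier*byte; multiplier *= 256
-- (ba[count] with 0 ≤ count < len(ba) is always in range; pyGetD is exact there)
def bytearrayToNumber (ba : List Int) : Int :=
  (((PySem.List.pyRange ((ba.length : Int) - 1) (-1) (-1)).foldl
    (fun (st : Int × Int) count =>
      let byte := PySem.List.pyGetD ba count 0
      (st.1 + st.2 * byte, st.2 * 256)) (0, 1))).1

-- ===== PORT B =====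
def bytearrayToNumber_alt (ba : List Int) : Int :=
  ba.foldl (fun total byte => total * 256 + byte) 0

-- ===== PRECONDITION & SPEC =====
def Spec_bytearrayToNumber (ba : List Int) (out : Int) : Prop := out = bytearrayToNumber_alt ba
instance (ba : List Int) (out : Int) : Decidable (Spec_bytearrayToNumber ba out) := by unfold Spec_bytearrayToNumber; infer_instance

-- ===== CLAIM (what is proved, stated in full; the proofs are below) =====
def Claim_equal_bytearrayToNumber : Prop := ∀ (ba : List Int), Dom_bytearrayToNumber ba → Spec_bytearrayToNumber ba (bytearrayToNumber ba)

-- ===== LEMMAS AND PROOFS =====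

-- little-endian value of a byte list (first byte least significant)
def pvLE : List Int → Int
  | [] => 0
  | y :: r => y + 256 * pvLE r

theorem pvLE_append (xs ys : List Int) :
    pvLE (xs ++ ys) = pvLE xs + 256 ^ xs.length * pvLE ys := by
  induction xs with
  | nil => simp [pvLE]
  | cons x r ih => simp [pvLE, ih, pow_succ]; ring

-- A's loop, run over any list of indices, computes t + m * (little-endian value of the fetched bytes)
theorem foldA (ba : List Int) (ys : List Int) : ∀ t m : Int,
    ((ys.foldl (fun (st : Int × Int) count =>
        let byte := PySem.List.pyGetD ba count 0
        (st.1 + st.2 * byte, st.2 * 256)) (t, m))).1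
      = t + m * pvLE (ys.map (fun j => PySem.List.pyGetD ba j 0)) := by
  induction ys with
  | nil => intro t m; simp [pvLE]
  | cons y r ih => intro t m; simp [List.foldl, ih, pvLE]; ring

-- B's Horner pass computes the little-endian value of the REVERSED list
theorem foldB (xs : List Int) : ∀ acc : Int,
    xs.foldl (fun total byte => total * 256 + byte) acc
      = acc * 256 ^ xs.length + pvLE xs.reverse := by
  induction xs with
  | nil => intro acc; simp [pvLE]
  | cons x r ih =>
      intro acc
      simp [List.foldl, ih, pvLE_append, pvLE, pow_succ]; ring

-- ===== VERDICT (by name: the statement is the Claim_ definition above) =====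
theorem bytearrayToNumber_spec : Claim_equal_bytearrayToNumber := by
  intro ba _
  show bytearrayToNumber ba = bytearrayToNumber_alt ba
  unfold bytearrayToNumber bytearrayToNumber_alt
  have h1 : PySem.List.pyRange ((ba.length : Int) - 1) (-1) (-1)
      = (PySem.List.pyRange 0 (ba.length : Int) 1).reverse := by
    have h := PySem.List.pyRange_neg_one_eq_reverse ((ba.length : Int) - 1) (-1)
    simpa using h
  rw [h1, foldA, List.map_reverse,
      PySem.List.map_pyGetD_pyRange_zero' ba 0, foldB]
  simp
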